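-- pv_equiv track=rewrite | github.com/as4401s/COVID-19-X_ray-image-classification | Efficientnet_B4/util.py | get_confusion_matrix_stats
-- ===== SOURCE A (Python) =====
-- def get_confusion_matrix_stats(y_actual, y_pred):
--     """
--     This function calculates and returns the True Positive, True negative,
--     False Positive and False negative values,
--     and returns them
--     """
--     TP = 0
--     FP = 0
--     TN = 0
--     FN = 0
--
--     for i in range(len(y_pred)):
--         if y_actual[i]==y_pred[i]==1:
--             TP += 1
--         if y_pred[i]==1 and y_actual[i]!=y_pred[i]:
--             FP += 1
--         if y_actual[i]==y_pred[i]==0: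
--             TN += 1
--         if y_pred[i]==0 and y_actual[i]!=y_pred[i]:
--             FN += 1
--
--     return(TP, FP, TN, FN)
-- ===== SOURCE B (Python) =====
-- def get_confusion_matrix_stats(y_actual, y_pred):
--     """
--     This function calculates and returns the True Positive, True negative,
--     False Positive and False negative values,
--     and returns them
--     """
--     table = {}
--     for i in range(len(y_pred)):
--         key = (y_actual[i], y_pred[i])
--         table[key] = table.get(key, 0) + 1
--     TP = table.get((1, 1), 0)
--     TN = table.get((0, 0), 0)
--     FP = 0
--     FN = 0
--     for (a, p), c in table.items():
--         if p == 1 and a != 1: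
--             FP += c
--         if p == 0 and a != 0:
--             FN += c
--     return (TP, FP, TN, FN)
-- ===== Notes on version B (the rewrite author's own statement) =====
-- stated objective: alternative
-- what changed: A fuses four conditional counters into one indexed loop; B instead builds a frequency table of (actual, pred) pairs in one indexed pass and then reads TP/TN off the table and sums FP/FN over the table's items.
import Mathlib
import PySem

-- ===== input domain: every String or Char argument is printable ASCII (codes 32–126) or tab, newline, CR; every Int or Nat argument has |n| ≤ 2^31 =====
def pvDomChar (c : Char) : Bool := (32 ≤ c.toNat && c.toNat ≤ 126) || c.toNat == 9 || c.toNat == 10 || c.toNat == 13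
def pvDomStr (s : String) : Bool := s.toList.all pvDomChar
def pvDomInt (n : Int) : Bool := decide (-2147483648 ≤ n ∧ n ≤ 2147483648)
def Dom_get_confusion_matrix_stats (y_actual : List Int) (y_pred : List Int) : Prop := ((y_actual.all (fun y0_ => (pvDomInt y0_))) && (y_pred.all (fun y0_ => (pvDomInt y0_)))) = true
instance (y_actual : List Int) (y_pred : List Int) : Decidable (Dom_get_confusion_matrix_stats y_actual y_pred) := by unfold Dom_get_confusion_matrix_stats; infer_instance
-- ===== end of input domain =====

-- B replaces A's four fused accumulators with a frequency table of (actual, pred) pairs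
-- aggregated afterwards (alternative decomposition; return value only, no side effects).


-- ===== PORT A =====
-- for i in range(len(y_pred)): four independent if's updating TP/FP/TN/FN.
-- (pyGetD with default 0 is exact under Pre_, which guarantees every index is in range.)
def get_confusion_matrix_stats (y_actual : List Int) (y_pred : List Int) : Int × Int × Int × Int :=
  (PySem.List.pyRange 0 (PySem.List.len y_pred) 1).foldl
    (fun (st : Int × Int × Int × Int) i =>
      let a := PySem.List.pyGetD y_actual i 0
      let p := PySem.List.pyGetD y_pred i 0
      let tp := if a = p ∧ p = 1 then st.1 + 1 else st.1
      let fp := if p = 1 ∧ a ≠ p then st.2.1 + 1 else st.2.1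
      let tn := if a = p ∧ p = 0 then st.2.2.1 + 1 else st.2.2.1
      let fn := if p = 0 ∧ a ≠ p then st.2.2.2 + 1 else st.2.2.2
      (tp, fp, tn, fn))
    (0, 0, 0, 0)

-- ===== PORT B =====
-- build table[(y_actual[i], y_pred[i])] += 1, then read TP/TN off the table and
-- sum FP/FN over its items in one loop (Source B's second for-loop).
def get_confusion_matrix_stats_alt (y_actual : List Int) (y_pred : List Int) : Int × Int × Int × Int :=
  let table := (PySem.List.pyRange 0 (PySem.List.len y_pred) 1).foldl
      (fun (t : PySem.Dict (Int × Int) Int) i =>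
        let key := (PySem.List.pyGetD y_actual i 0, PySem.List.pyGetD y_pred i 0)
        t.insert key (t.getD key 0 + 1))
      PySem.Dict.empty
  let TP := table.getD (1, 1) 0
  let TN := table.getD (0, 0) 0
  let s := table.items.foldl
      (fun (s : Int × Int) kc =>
        (if kc.1.2 = 1 ∧ kc.1.1 ≠ 1 then s.1 + kc.2 else s.1,
         if kc.1.2 = 0 ∧ kc.1.1 ≠ 0 then s.2 + kc.2 else s.2))
      (0, 0)
  (TP, s.1, TN, s.2)

-- ===== PRECONDITION & SPEC =====
-- Pre_ excludes exactly the inputs where Python A raises IndexError (y_actual shorter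
-- than y_pred); B indexes the same way and raises there too.
def Pre_get_confusion_matrix_stats (y_actual : List Int) (y_pred : List Int) : Prop :=
  y_pred.length ≤ y_actual.length
instance (y_actual : List Int) (y_pred : List Int) : Decidable (Pre_get_confusion_matrix_stats y_actual y_pred) := by unfold Pre_get_confusion_matrix_stats; infer_instance
def pvWitness_get_confusion_matrix_stats : List Int × List Int := ([1, 0, 1, 2], [1, 1, 0])
def Spec_get_confusion_matrix_stats (y_actual : List Int) (y_pred : List Int) (out : Int × Int × Int × Int) : Prop := out = get_confusion_matrix_stats_alt y_actual y_pred
instance (y_actual : List Int) (y_pred : List Int) (out : Int × Int × Int × Int) : Decidable (Spec_get_confusion_matrix_stats y_actual y_pred out) := by unfold Spec_get_confusion_matrix_stats; infer_instance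

-- ===== CLAIM (what is proved, stated in full; the proofs are below) =====
def Claim_equal_get_confusion_matrix_stats : Prop := ∀ (y_actual : List Int) (y_pred : List Int), Dom_get_confusion_matrix_stats y_actual y_pred → Pre_get_confusion_matrix_stats y_actual y_pred → Spec_get_confusion_matrix_stats y_actual y_pred (get_confusion_matrix_stats y_actual y_pred)

-- ===== LEMMAS AND PROOFS =====

-- An index loop over range(len ys), reading both xs[i] and ys[i], is a fold over zip xs ys
-- when xs is at least as long as ys.
theorem foldl_range_two_getD {σ : Type} (g : σ → Int → Int → σ) :
    ∀ (ys xs : List Int) (init : σ), ys.length ≤ xs.length →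
    (List.range ys.length).foldl (fun st k => g st (xs.getD k 0) (ys.getD k 0)) init
      = (xs.zip ys).foldl (fun st ap => g st ap.1 ap.2) init := by
  intro ys
  induction ys with
  | nil => intro xs init _; simp
  | cons y ys ih =>
    intro xs init h
    cases xs with
    | nil => simp at h
    | cons x xs =>
      simp only [List.length_cons]
      rw [List.range_succ_eq_map]
      simp only [List.foldl_cons, List.foldl_map, List.getD_cons_zero, List.getD_cons_succ,
        List.zip_cons_cons]
      exact ih xs (g init x y) (by simpa using h)

-- A's fused fold, characterised: each accumulator advances by a countP over the pairs.
theorem a_fold_counts (L : List (Int × Int)) :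
    ∀ (tp fp tn fn : Int),
    L.foldl (fun (st : Int × Int × Int × Int) ap =>
        (if ap.1 = ap.2 ∧ ap.2 = 1 then st.1 + 1 else st.1,
         if ap.2 = 1 ∧ ap.1 ≠ ap.2 then st.2.1 + 1 else st.2.1,
         if ap.1 = ap.2 ∧ ap.2 = 0 then st.2.2.1 + 1 else st.2.2.1,
         if ap.2 = 0 ∧ ap.1 ≠ ap.2 then st.2.2.2 + 1 else st.2.2.2)) (tp, fp, tn, fn)
      = (tp + L.countP (fun ap => ap.1 = ap.2 ∧ ap.2 = 1),
         fp + L.countP (fun ap => ap.2 = 1 ∧ ap.1 ≠ ap.2),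
         tn + L.countP (fun ap => ap.1 = ap.2 ∧ ap.2 = 0),
         fn + L.countP (fun ap => ap.2 = 0 ∧ ap.1 ≠ ap.2)) := by
  induction L with
  | nil => simp
  | cons ap L ih =>
    intro tp fp tn fn
    simp only [List.foldl_cons, ih, List.countP_cons, decide_eq_true_eq, Prod.mk.injEq]
    push_cast
    refine ⟨?_, ?_, ?_, ?_⟩ <;> split_ifs <;> ring

-- summing the indicator of (P k ∧ k = x) over a nodup list containing x picks out x once.
theorem sum_ite_single (P : Int × Int → Prop) [DecidablePred P] (x : Int × Int) :
    ∀ K : List (Int × Int), K.Nodup → x ∈ K →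
    (K.map (fun k => if P k ∧ k = x then (1 : Int) else 0)).sum = if P x then 1 else 0 := by
  intro K
  induction K with
  | nil => intro _ hx; simp at hx
  | cons k K ihk =>
    intro hnd hx
    simp only [List.map_cons, List.sum_cons]
    rcases List.mem_cons.mp hx with h | h
    · subst h
      rw [List.sum_eq_zero, add_zero]
      · by_cases hp : P x <;> simp [hp]
      · intro v hv
        obtain ⟨j, hj, rfl⟩ := List.mem_map.mp hv
        have hjx : ¬ (P j ∧ j = x) := by
          rintro ⟨_, rfl⟩
          exact (List.nodup_cons.mp hnd).1 hj
        simp [hjx]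
    · have hkx : ¬ (P k ∧ k = x) := by
        rintro ⟨_, rfl⟩
        exact (List.nodup_cons.mp hnd).1 h
      rw [ihk (List.nodup_cons.mp hnd).2 h, if_neg hkx, zero_add]

-- summing (if P k then count k L else 0) over any nodup list containing all of L
-- counts exactly the elements of L satisfying P.
theorem sum_ite_count (P : Int × Int → Prop) [DecidablePred P] :
    ∀ (L K : List (Int × Int)), K.Nodup → (∀ x ∈ L, x ∈ K) →
    (K.map (fun k => if P k then (L.count k : Int) else 0)).sum = L.countP (fun x => P x) := by
  intro L
  induction L with
  | nil => intro K _ _; simp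
  | cons x L ih =>
    intro K hnd hsub
    have hx : x ∈ K := hsub x (List.mem_cons_self)
    have hrest : ∀ y ∈ L, y ∈ K := fun y hy => hsub y (List.mem_cons_of_mem _ hy)
    have hsplit : (K.map (fun k => if P k then (List.count k (x :: L) : Int) else 0)).sum
        = (K.map (fun k => if P k then (L.count k : Int) else 0)).sum
          + (K.map (fun k => if P k ∧ k = x then (1 : Int) else 0)).sum := by
      rw [← PySem.List.sum_map_add_int]
      refine congrArg List.sum (List.map_congr_left ?_)
      intro k _
      rw [List.count_cons]
      by_cases hp : P k <;> by_cases hk : k = x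
      · subst hk; simp [hp]
      · simp [hp, hk, Ne.symm hk]
      · simp [hp]
      · simp [hp]
    rw [hsplit, ih K hnd hrest, sum_ite_single P x K hnd hx, List.countP_cons]
    by_cases hp : P x <;> simp [hp]

-- an `if p then s + v else s` accumulation is the sum of the guarded values.
theorem foldl_ite_add (p : (Int × Int) × Int → Prop) [DecidablePred p]
    (l : List ((Int × Int) × Int)) (a : Int) :
    l.foldl (fun s kc => if p kc then s + kc.2 else s) a
      = a + (l.map (fun kc => if p kc then kc.2 else 0)).sum := by
  have hfun : (fun (s : Int) kc => if p kc then s + kc.2 else s)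
      = (fun s kc => s + (if p kc then kc.2 else 0)) := by
    funext s kc; split_ifs <;> simp
  rw [hfun, PySem.List.foldl_add]

-- A's value, in closed form over the zipped pairs.
theorem a_closed (y_actual y_pred : List Int) (h : y_pred.length ≤ y_actual.length) :
    get_confusion_matrix_stats y_actual y_pred
      = (((y_actual.zip y_pred).countP (fun ap => ap.1 = ap.2 ∧ ap.2 = 1) : Int),
         ((y_actual.zip y_pred).countP (fun ap => ap.2 = 1 ∧ ap.1 ≠ ap.2) : Int),
         ((y_actual.zip y_pred).countP (fun ap => ap.1 = ap.2 ∧ ap.2 = 0) : Int),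
         ((y_actual.zip y_pred).countP (fun ap => ap.2 = 0 ∧ ap.1 ≠ ap.2) : Int)) := by
  unfold get_confusion_matrix_stats
  rw [PySem.List.len_eq, PySem.List.pyRange_zero_natCast, List.foldl_map]
  simp only [PySem.List.pyGetD_natCast]
  rw [foldl_range_two_getD
      (fun (st : Int × Int × Int × Int) a p =>
        (if a = p ∧ p = 1 then st.1 + 1 else st.1,
         if p = 1 ∧ a ≠ p then st.2.1 + 1 else st.2.1,
         if a = p ∧ p = 0 then st.2.2.1 + 1 else st.2.2.1,
         if p = 0 ∧ a ≠ p then st.2.2.2 + 1 else st.2.2.2)) y_pred y_actual _ h]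
  rw [a_fold_counts]
  simp

-- B's value, in closed form over the zipped pairs.
theorem b_closed (y_actual y_pred : List Int) (h : y_pred.length ≤ y_actual.length) :
    get_confusion_matrix_stats_alt y_actual y_pred
      = (((y_actual.zip y_pred).count (1, 1) : Int),
         ((y_actual.zip y_pred).countP (fun k => k.2 = 1 ∧ k.1 ≠ 1) : Int),
         ((y_actual.zip y_pred).count (0, 0) : Int),
         ((y_actual.zip y_pred).countP (fun k => k.2 = 0 ∧ k.1 ≠ 0) : Int)) := by
  unfold get_confusion_matrix_stats_alt
  rw [PySem.List.len_eq, PySem.List.pyRange_zero_natCast, List.foldl_map]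
  simp only [PySem.List.pyGetD_natCast]
  rw [foldl_range_two_getD
      (fun (t : PySem.Dict (Int × Int) Int) a p =>
        t.insert (a, p) (t.getD (a, p) 0 + 1)) y_pred y_actual _ h]
  simp only [Prod.mk.eta]
  rw [PySem.Dict.foldl_insert_getD_add_one_eq_counter]
  rw [PySem.Dict.getD_counter, PySem.Dict.getD_counter, PySem.Dict.items_counter]
  rw [PySem.List.foldl_prod_mk
      (fun (s : Int) (kc : (Int × Int) × Int) => if kc.1.2 = 1 ∧ kc.1.1 ≠ 1 then s + kc.2 else s)
      (fun (s : Int) (kc : (Int × Int) × Int) => if kc.1.2 = 0 ∧ kc.1.1 ≠ 0 then s + kc.2 else s)]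
  rw [foldl_ite_add, foldl_ite_add, List.map_map, List.map_map]
  simp only [Function.comp_def]
  rw [sum_ite_count (fun k => k.2 = 1 ∧ k.1 ≠ 1) (y_actual.zip y_pred) _
        (PySem.Set.nodup_ofList _) (fun x hx => (PySem.Set.mem_ofList _ _).mpr hx),
      sum_ite_count (fun k => k.2 = 0 ∧ k.1 ≠ 0) (y_actual.zip y_pred) _
        (PySem.Set.nodup_ofList _) (fun x hx => (PySem.Set.mem_ofList _ _).mpr hx)]
  simp

-- ===== VERDICT (by name: the statement is the Claim_ definition above) =====
theorem get_confusion_matrix_stats_spec : Claim_equal_get_confusion_matrix_stats := by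
  intro y_actual y_pred _ hpre
  unfold Spec_get_confusion_matrix_stats
  rw [a_closed _ _ hpre, b_closed _ _ hpre]
  refine congrArg₂ _ ?_ (congrArg₂ _ ?_ (congrArg₂ _ ?_ ?_))
  · rw [List.count_eq_countP]
    exact congrArg _ (List.countP_congr (fun ap _ => by
      rcases ap with ⟨a, p⟩
      simp only [decide_eq_true_eq, beq_iff_eq, Prod.mk.injEq]
      omega))
  · exact congrArg _ (List.countP_congr (fun ap _ => by
      rcases ap with ⟨a, p⟩
      simp only [decide_eq_true_eq]
      omega))
  · rw [List.count_eq_countP]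
    exact congrArg _ (List.countP_congr (fun ap _ => by
      rcases ap with ⟨a, p⟩
      simp only [decide_eq_true_eq, beq_iff_eq, Prod.mk.injEq]
      omega))
  · exact congrArg _ (List.countP_congr (fun ap _ => by
      rcases ap with ⟨a, p⟩
      simp only [decide_eq_true_eq]
      omega))
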